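-- pv_equiv track=rewrite | github.com/ivanfarevalo/Edge_Detection | Algorithmic_Toolbox_C1/W1_Intro/max_pair_product.py | max_pair_product_sol2
-- ===== SOURCE A (Python) =====
-- def max_pair_product_sol2(numbers : []) -> int:
--     '''Iterate through array and keep pointers at 2 highest numbers'''
--     assert (len(numbers) > 1), "Length should be more than 2"
--     max_idx_1 = 0
--     max_idx_2 = 1
--     for i in range(1, len(numbers)):
--         if numbers[i]>numbers[max_idx_1]:
--             max_idx_2 = max_idx_1
--             max_idx_1 = i
--         elif numbers[i]>numbers[max_idx_2]:
--             max_idx_2 = i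
--
--     return numbers[max_idx_1]*numbers[max_idx_2]
-- ===== SOURCE B (Python) =====
-- def max_pair_product_sol2(numbers : []) -> int:
--     '''Sort a copy ascending; the answer is the product of the last two elements.'''
--     assert (len(numbers) > 1), "Length should be more than 2"
--     s = sorted(numbers)
--     return s[-1] * s[-2]
-- ===== Notes on version B (the rewrite author's own statement) =====
-- stated objective: simpler
-- what changed: Replaced the single-pass two-index max tracking with sort-then-index: sorted(numbers)[-1] * sorted(numbers)[-2].
import Mathlib
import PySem

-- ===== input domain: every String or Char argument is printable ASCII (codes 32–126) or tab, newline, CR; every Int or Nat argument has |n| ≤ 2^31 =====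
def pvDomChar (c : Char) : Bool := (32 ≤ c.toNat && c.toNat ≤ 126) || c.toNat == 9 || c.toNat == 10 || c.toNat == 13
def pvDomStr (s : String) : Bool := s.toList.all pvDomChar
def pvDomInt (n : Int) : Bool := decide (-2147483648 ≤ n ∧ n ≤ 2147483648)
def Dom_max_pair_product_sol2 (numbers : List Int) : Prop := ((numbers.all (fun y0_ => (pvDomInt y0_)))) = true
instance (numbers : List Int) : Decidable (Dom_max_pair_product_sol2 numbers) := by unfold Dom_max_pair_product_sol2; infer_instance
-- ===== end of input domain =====

-- B replaces A's single-pass two-index max tracking by sort-then-index (simpler); return value only, neither mutates its argument.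

-- ===== PORT A =====
-- loop body of A: update the two tracked max indices on seeing index i
def stepA (numbers : List Int) (s : Nat × Nat) (i : Nat) : Nat × Nat :=
  if numbers.getD i 0 > numbers.getD s.1 0 then (i, s.1)
  else if numbers.getD i 0 > numbers.getD s.2 0 then (s.1, i)
  else s

def max_pair_product_sol2 (numbers : List Int) : Int :=
  let st := (List.range' 1 (numbers.length - 1)).foldl (stepA numbers) (0, 1)
  numbers.getD st.1 0 * numbers.getD st.2 0

-- ===== PORT B =====
def max_pair_product_sol2_alt (numbers : List Int) : Int :=
  let s := PySem.List.sorted numbers (fun x => x) false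
  ((PySem.List.pyGet? s (-1)).getD 0) * ((PySem.List.pyGet? s (-2)).getD 0)

-- ===== PRECONDITION & SPEC =====
-- Pre_ excludes lists of length ≤ 1, on which Python A raises AssertionError (B keeps the same assert and raises too).
def Pre_max_pair_product_sol2 (numbers : List Int) : Prop := 2 ≤ numbers.length
instance (numbers : List Int) : Decidable (Pre_max_pair_product_sol2 numbers) := by unfold Pre_max_pair_product_sol2; infer_instance
def pvWitness_max_pair_product_sol2 : List Int := [1, 2]
def Spec_max_pair_product_sol2 (numbers : List Int) (out : Int) : Prop := out = max_pair_product_sol2_alt numbers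
instance (numbers : List Int) (out : Int) : Decidable (Spec_max_pair_product_sol2 numbers out) := by unfold Spec_max_pair_product_sol2; infer_instance

-- ===== CLAIM (what is proved, stated in full; the proofs are below) =====
def Claim_equal_max_pair_product_sol2 : Prop := ∀ (numbers : List Int), Dom_max_pair_product_sol2 numbers → Pre_max_pair_product_sol2 numbers → Spec_max_pair_product_sol2 numbers (max_pair_product_sol2 numbers)

-- ===== LEMMAS AND PROOFS =====

-- v1, v2 are the two largest values of the multiset m (v1 the max, v2 the max after removing one copy of v1)
def Top2 (m : Multiset Int) (v1 v2 : Int) : Prop :=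
  v1 ∈ m ∧ v2 ∈ m.erase v1 ∧ (∀ y ∈ m, y ≤ v1) ∧ (∀ y ∈ m.erase v1, y ≤ v2)

theorem top2_unique {m : Multiset Int} {a b c d : Int}
    (h1 : Top2 m a b) (h2 : Top2 m c d) : a = c ∧ b = d := by
  obtain ⟨ha, hb, hamax, hbmax⟩ := h1
  obtain ⟨hc, hd, hcmax, hdmax⟩ := h2
  have hac : a = c := le_antisymm (hcmax a ha) (hamax c hc)
  subst hac
  exact ⟨rfl, le_antisymm (hdmax b hb) (hbmax d hd)⟩

theorem top2_pair (a b : Int) :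
    (a < b → Top2 (a ::ₘ {b}) b a) ∧ (¬ a < b → Top2 (a ::ₘ {b}) a b) := by
  constructor
  · intro h
    have hne : a ≠ b := ne_of_lt h
    refine ⟨by simp, ?_, ?_, ?_⟩
    · rw [Multiset.erase_cons_tail _ (by simpa using hne.symm ∘ Eq.symm)]
      simp
    · intro y hy
      rcases Multiset.mem_cons.mp hy with h' | h'
      · omega
      · simp at h'; omega
    · intro y hy
      rw [Multiset.erase_cons_tail _ (by simpa using hne.symm ∘ Eq.symm)] at hy
      simp at hy; omega
  · intro h
    refine ⟨by simp, ?_, ?_, ?_⟩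
    · rw [Multiset.erase_cons_head]; simp
    · intro y hy
      rcases Multiset.mem_cons.mp hy with h' | h'
      · omega
      · simp at h'; omega
    · intro y hy
      rw [Multiset.erase_cons_head] at hy
      simp at hy; omega

theorem top2_step1 {m : Multiset Int} {v1 v2 x : Int}
    (h : Top2 m v1 v2) (hx : v1 < x) : Top2 (x ::ₘ m) x v1 := by
  obtain ⟨h1, _, h3, _⟩ := h
  refine ⟨Multiset.mem_cons_self x m, ?_, ?_, ?_⟩
  · rw [Multiset.erase_cons_head]; exact h1
  · intro y hy
    rcases Multiset.mem_cons.mp hy with h' | h'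
    · omega
    · have := h3 y h'; omega
  · intro y hy
    rw [Multiset.erase_cons_head] at hy
    exact h3 y hy

theorem top2_step2 {m : Multiset Int} {v1 v2 x : Int}
    (h : Top2 m v1 v2) (hx1 : ¬ v1 < x) (hx2 : v2 < x) : Top2 (x ::ₘ m) v1 x := by
  obtain ⟨h1, h2, h3, h4⟩ := h
  refine ⟨Multiset.mem_cons_of_mem h1, ?_, ?_, ?_⟩
  · by_cases hv : x = v1
    · subst hv; rw [Multiset.erase_cons_head]; exact h1
    · rw [Multiset.erase_cons_tail _ (by simpa using hv)]
      exact Multiset.mem_cons_self x _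
  · intro y hy
    rcases Multiset.mem_cons.mp hy with h' | h'
    · omega
    · exact h3 y h'
  · intro y hy
    by_cases hv : x = v1
    · subst hv
      rw [Multiset.erase_cons_head] at hy
      exact h3 y hy
    · rw [Multiset.erase_cons_tail _ (by simpa using hv)] at hy
      rcases Multiset.mem_cons.mp hy with h' | h'
      · omega
      · have := h4 y h'; omega

theorem top2_step3 {m : Multiset Int} {v1 v2 x : Int}
    (h : Top2 m v1 v2) (hx1 : ¬ v1 < x) (hx2 : ¬ v2 < x) : Top2 (x ::ₘ m) v1 v2 := by
  obtain ⟨h1, h2, h3, h4⟩ := h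
  refine ⟨Multiset.mem_cons_of_mem h1, ?_, ?_, ?_⟩
  · by_cases hv : x = v1
    · subst hv; rw [Multiset.erase_cons_head]
      exact Multiset.mem_of_mem_erase h2
    · rw [Multiset.erase_cons_tail _ (by simpa using hv)]
      exact Multiset.mem_cons_of_mem h2
  · intro y hy
    rcases Multiset.mem_cons.mp hy with h' | h'
    · omega
    · exact h3 y h'
  · intro y hy
    by_cases hv : x = v1
    · subst hv
      rw [Multiset.erase_cons_head] at hy
      rw [← Multiset.cons_erase h1] at hy
      rcases Multiset.mem_cons.mp hy with h' | h'
      · omega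
      · exact h4 y h'
    · rw [Multiset.erase_cons_tail _ (by simpa using hv)] at hy
      rcases Multiset.mem_cons.mp hy with h' | h'
      · omega
      · exact h4 y h'

-- invariant of A's fold: after processing indices 1..j, the two tracked indices are distinct,
-- in range, and hold the two largest values of the prefix of length j+1
theorem foldA_inv (numbers : List Int) (j : Nat) (hj : 1 ≤ j) (hjn : j + 1 ≤ numbers.length) :
    ((List.range' 1 j).foldl (stepA numbers) (0, 1)).1 < j + 1 ∧
    ((List.range' 1 j).foldl (stepA numbers) (0, 1)).2 < j + 1 ∧
    ((List.range' 1 j).foldl (stepA numbers) (0, 1)).1 ≠ ((List.range' 1 j).foldl (stepA numbers) (0, 1)).2 ∧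
    Top2 (↑(numbers.take (j + 1)))
      (numbers.getD ((List.range' 1 j).foldl (stepA numbers) (0, 1)).1 0)
      (numbers.getD ((List.range' 1 j).foldl (stepA numbers) (0, 1)).2 0) := by
  induction j with
  | zero => omega
  | succ j ih =>
    rcases Nat.lt_or_ge j 1 with hj0 | hj1
    · -- base case: j = 0, the first iteration (i = 1)
      interval_cases j
      obtain ⟨a, b, rest, rfl⟩ : ∃ a b rest, numbers = a :: b :: rest := by
        match numbers, hjn with
        | a :: b :: rest, _ => exact ⟨a, b, rest, rfl⟩
      have hcoe : (↑(List.take (0 + 1 + 1) (a :: b :: rest)) : Multiset Int) = a ::ₘ {b} := rfl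
      have hfold : (List.range' 1 (0 + 1)).foldl (stepA (a :: b :: rest)) (0, 1)
          = if a < b then (1, 0) else (0, 1) := by
        simp only [zero_add, List.range'_one, List.foldl_cons, List.foldl_nil, stepA,
          List.getD_cons_zero, List.getD_cons_succ]
        by_cases hab : a < b
        · rw [if_pos (show b > a from hab), if_pos hab]
        · rw [if_neg (show ¬ b > a from hab), if_neg (show ¬ b > b by omega), if_neg hab]
      rw [hfold, hcoe]
      by_cases hab : a < b
      · rw [if_pos hab]
        exact ⟨by omega, by omega, by omega, by simpa using (top2_pair a b).1 hab⟩
      · rw [if_neg hab]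
        exact ⟨by omega, by omega, by omega, by simpa using (top2_pair a b).2 hab⟩
    · -- inductive step: process index j + 1
      have hjn' : j + 1 ≤ numbers.length := by omega
      obtain ⟨hb1, hb2, hbne, htop⟩ := ih hj1 hjn'
      have hlt : j + 1 < numbers.length := by omega
      rw [List.range'_1_concat, List.foldl_append, List.foldl_cons, List.foldl_nil]
      set st := (List.range' 1 j).foldl (stepA numbers) (0, 1) with hst
      have hx : numbers.getD (1 + j) 0 = numbers[j + 1] := by
        rw [Nat.add_comm 1 j]; exact List.getD_eq_getElem numbers 0 hlt
      have htake : (↑(numbers.take (j + 1 + 1)) : Multiset Int)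
          = numbers[j + 1] ::ₘ ↑(numbers.take (j + 1)) := by
        rw [List.take_add_one, List.getElem?_eq_getElem hlt]
        simp only [Option.toList_some]
        rw [Multiset.cons_coe, Multiset.coe_eq_coe]
        exact List.perm_append_singleton _ _
      unfold stepA
      rw [hx]
      split_ifs with h1 h2
      · refine ⟨by omega, by omega, by omega, ?_⟩
        rw [htake, hx]
        exact top2_step1 htop (by omega)
      · refine ⟨by omega, by omega, by omega, ?_⟩
        rw [htake, hx]
        exact top2_step2 htop (by omega) (by omega)
      · refine ⟨by omega, by omega, hbne, ?_⟩
        rw [htake]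
        exact top2_step3 htop (by omega) (by omega)

theorem A_eval (numbers : List Int) (h : 2 ≤ numbers.length) :
    ∃ v1 v2, max_pair_product_sol2 numbers = v1 * v2 ∧ Top2 (↑numbers) v1 v2 := by
  have hj : (1 : Nat) ≤ numbers.length - 1 := by omega
  have hjn : numbers.length - 1 + 1 ≤ numbers.length := by omega
  obtain ⟨_, _, _, htop⟩ := foldA_inv numbers (numbers.length - 1) hj hjn
  rw [show numbers.length - 1 + 1 = numbers.length by omega, List.take_length] at htop
  exact ⟨_, _, rfl, htop⟩

theorem B_eval (numbers : List Int) (h : 2 ≤ numbers.length) :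
    ∃ v1 v2, max_pair_product_sol2_alt numbers = v1 * v2 ∧ Top2 (↑numbers) v1 v2 := by
  set s := PySem.List.sorted numbers (fun x => x) false with hs
  have hlen : s.length = numbers.length := PySem.List.length_sorted ..
  have hs2 : 2 ≤ s.length := by omega
  have h1 : s.length - 1 < s.length := by omega
  have h2 : s.length - 2 < s.length := by omega
  have hg1 : PySem.List.pyGet? s (-1) = some s[s.length - 1] := by
    rw [PySem.List.pyGet?_neg_ofNat s 1 (by omega) (by omega), List.getElem?_eq_getElem h1]
  have hg2 : PySem.List.pyGet? s (-2) = some s[s.length - 2] := by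
    rw [PySem.List.pyGet?_neg_ofNat s 2 (by omega) (by omega), List.getElem?_eq_getElem h2]
  refine ⟨s[s.length - 1], s[s.length - 2], ?_, ?_⟩
  · show ((PySem.List.pyGet? s (-1)).getD 0) * ((PySem.List.pyGet? s (-2)).getD 0) = _
    rw [hg1, hg2]; rfl
  · have hperm : (↑s : Multiset Int) = ↑numbers :=
      Multiset.coe_eq_coe.mpr (PySem.List.sorted_perm ..)
    rw [← hperm]
    have hne : s ≠ [] := by intro h'; rw [h'] at hs2; simp at hs2
    have hlast : s.getLast hne = s[s.length - 1] := List.getLast_eq_getElem hne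
    have hdrop : (↑s : Multiset Int) = s[s.length - 1] ::ₘ ↑s.dropLast := by
      conv_lhs => rw [← List.dropLast_append_getLast hne]
      rw [hlast, Multiset.cons_coe, Multiset.coe_eq_coe]
      exact List.perm_append_singleton _ _
    have hmono : ∀ (p q : Nat) (hpq : p ≤ q) (hq : q < s.length),
        s[p]'(Nat.lt_of_le_of_lt hpq hq) ≤ s[q] := by
      intro p q hpq hq
      exact PySem.List.sorted_id_getElem_mono numbers hpq hq
    refine ⟨List.getElem_mem h1, ?_, ?_, ?_⟩
    · rw [hdrop, Multiset.erase_cons_head]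
      have hdl : s.length - 2 < s.dropLast.length := by
        rw [List.length_dropLast]; omega
      have : s.dropLast[s.length - 2] = s[s.length - 2] := List.getElem_dropLast hdl
      rw [Multiset.mem_coe, ← this]
      exact List.getElem_mem hdl
    · intro y hy
      rw [Multiset.mem_coe, List.mem_iff_getElem] at hy
      obtain ⟨p, hp, rfl⟩ := hy
      exact hmono p (s.length - 1) (by omega) h1
    · intro y hy
      rw [hdrop, Multiset.erase_cons_head, Multiset.mem_coe, List.mem_iff_getElem] at hy
      obtain ⟨p, hp, rfl⟩ := hy
      have hp' : p < s.length - 1 := by rw [List.length_dropLast] at hp; omega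
      rw [List.getElem_dropLast]
      exact hmono p (s.length - 2) (by omega) h2

-- ===== VERDICT (by name: the statement is the Claim_ definition above) =====
theorem max_pair_product_sol2_spec : Claim_equal_max_pair_product_sol2 := by
  intro numbers _ hpre
  unfold Spec_max_pair_product_sol2
  obtain ⟨a1, a2, hA, hTA⟩ := A_eval numbers hpre
  obtain ⟨b1, b2, hB, hTB⟩ := B_eval numbers hpre
  obtain ⟨h1, h2⟩ := top2_unique hTA hTB
  rw [hA, hB, h1, h2]
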